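-- pv_equiv track=rewrite | github.com/morganism42/AdventOfCodeMaster | 2025/Dec6.py | part1
-- ===== SOURCE A (Python) =====
-- from math import prod
--
-- def parser(Data):
-- 	Data = Data.split('\n')
-- 	index = 0
-- 	problems = []
-- 	# split into problems by empty columns
-- 	for x in range(len(Data[0])):
-- 		if set([Data[y][x] for y in range(len(Data))]) == {' '}:
-- 			problems.append([Data[y][index:x] for y in range(len(Data))])
-- 			index = x + 1
-- 	else:
-- 		# needed as it there is no empty column at the end of the file
-- 		problems.append([Data[y][index:] for y in range(len(Data))])
-- 	return problems
--
-- def part1(Data):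
-- 	ans = 0
-- 	problems = parser(Data)
-- 	for problem in problems:
-- 		numbs, op = [int(x) for x in problem[:-1]], problem[-1]
-- 		if '+' in op:
-- 			ans += sum(numbs)
-- 		else:
-- 			ans += prod(numbs)
-- 	return ans
-- ===== SOURCE B (Python) =====
-- from math import prod
--
-- def part1(Data):
-- 	return solve(Data.split('\n'))
--
-- def solve(rows):
-- 	# recursive divide: peel the leading problem at the first all-space column
-- 	for x in range(len(rows[0])):
-- 		if all(row[x] == ' ' for row in rows):
-- 			return evaluate([row[:x] for row in rows]) + solve([row[x + 1:] for row in rows])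
-- 	return evaluate(rows)
--
-- def evaluate(block):
-- 	nums = [int(s) for s in block[:-1]]
-- 	return sum(nums) if '+' in block[-1] else prod(nums)
-- ===== Notes on version B (the rewrite author's own statement) =====
-- stated objective: alternative
-- what changed: A iterates once over all columns with a mutable index register to build an intermediate list of all problems and then aggregates it in a second loop; B is a recursive divide: it finds only the first all-space column, evaluates the peeled leading problem immediately, and recurses on the remaining sub-grid, with no index state, no separator bookkeeping and no intermediate problems list.
import Mathlib
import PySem

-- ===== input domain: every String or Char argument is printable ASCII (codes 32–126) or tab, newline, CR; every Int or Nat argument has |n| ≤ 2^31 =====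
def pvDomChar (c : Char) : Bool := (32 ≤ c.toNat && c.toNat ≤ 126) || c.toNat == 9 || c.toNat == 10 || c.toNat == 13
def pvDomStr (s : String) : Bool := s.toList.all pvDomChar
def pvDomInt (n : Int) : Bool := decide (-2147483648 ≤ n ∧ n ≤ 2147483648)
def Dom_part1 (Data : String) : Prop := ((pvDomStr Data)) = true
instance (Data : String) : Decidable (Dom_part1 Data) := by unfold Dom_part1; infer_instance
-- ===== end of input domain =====

-- B replaces A's iterative column scan (index register + intermediate problems list + second
-- aggregation loop) by a recursive divide: peel off the leading problem at the first all-space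
-- column and recurse on the rest of the grid, evaluating each problem as it is peeled
-- (objective: alternative; same return value on every input where A returns).

-- ===== PORT A =====
-- helper 'parser' of A (returns the list of problems, each a list of row slices)
def parser (Data : String) : List (List (List Char)) :=
  let rows := PySem.Chars.splitOn Data.toList ['\n']
  let st :=
    (PySem.List.pyRange 0 (PySem.List.len (PySem.List.pyGetD rows 0 []))).foldl
      (fun (st : Int × List (List (List Char))) x =>
        if PySem.Set.equal
            (PySem.Set.ofList ((PySem.List.pyRange 0 (PySem.List.len rows)).map
              (fun y => PySem.List.pyGetD (PySem.List.pyGetD rows y []) x '\x00')))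
            (PySem.Set.ofList [' ']) then
          (x + 1,
           st.2 ++ [(PySem.List.pyRange 0 (PySem.List.len rows)).map
             (fun y => PySem.List.slice (PySem.List.pyGetD rows y []) (some st.1) (some x))])
        else st)
      (0, [])
  st.2 ++ [(PySem.List.pyRange 0 (PySem.List.len rows)).map
    (fun y => PySem.List.slice (PySem.List.pyGetD rows y []) (some st.1) none)]

def part1 (Data : String) : Int :=
  (parser Data).foldl
    (fun ans problem =>
      let numbs := (PySem.List.slice problem none (some (-1))).map
        (fun s => (PySem.Int.ofChars? s).getD 0)
      let op := PySem.List.pyGetD problem (-1) []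
      if PySem.Chars.isIn ['+'] op then ans + numbs.sum else ans + numbs.prod)
    0

-- ===== PORT B =====
-- 'evaluate' of Source B: sum or product of a single problem's numbers
def pvEvaluate (block : List (List Char)) : Int :=
  let nums := (PySem.List.slice block none (some (-1))).map
    (fun s => (PySem.Int.ofChars? s).getD 0)
  if PySem.Chars.isIn ['+'] (PySem.List.pyGetD block (-1) []) then nums.sum else nums.prod

-- 'solve' of Source B: peel the leading problem at the first all-space column and recurse
def pvSolve (rows : List (List Char)) : Int :=
  match h : (PySem.List.pyRange 0 (PySem.List.len (PySem.List.pyGetD rows 0 []))).find?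
      (fun x => rows.all (fun row => PySem.List.pyGetD row x '\x00' == ' ')) with
  | some x =>
      pvEvaluate (rows.map (fun row => PySem.List.slice row none (some x))) +
      pvSolve (rows.map (fun row => PySem.List.slice row (some (x + 1)) none))
  | none => pvEvaluate rows
termination_by (PySem.List.pyGetD rows 0 []).length
decreasing_by
  have hmem := List.mem_of_find?_eq_some h
  have hx : 0 ≤ x ∧ x < PySem.List.len (PySem.List.pyGetD rows 0 []) :=
    (PySem.List.mem_pyRange_one).mp hmem
  rw [PySem.List.len_eq] at hx
  cases rows with
  | nil => simp [PySem.List.pyGetD] at hx; omega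
  | cons r t =>
    simp only [List.attach_cons, List.map_cons, PySem.List.pyGetD_zero_cons] at hx ⊢
    rw [PySem.List.slice_from r (by omega : (0:Int) ≤ x + 1)]
    rw [List.length_drop]
    omega

def part1_alt (Data : String) : Int :=
  pvSolve (PySem.Chars.splitOn Data.toList ['\n'])

-- ===== PRECONDITION & SPEC =====
-- helpers for Pre_ only: the grid's rows, its separator columns and its blocks, stated declaratively
def pvRows (Data : String) : List (List Char) := PySem.Chars.splitOn Data.toList ['\n']
def pvSeps (rows : List (List Char)) : List Int :=
  (PySem.List.pyRange 0 (PySem.List.len (PySem.List.pyGetD rows 0 []))).filter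
    (fun x => rows.all (fun row => PySem.List.pyGetD row x '\x00' == ' '))
def pvBlocks (rows : List (List Char)) : List (List (List Char)) :=
  (List.zip ((-1) :: pvSeps rows) ((pvSeps rows).map some ++ [none])).map
    (fun ab => rows.map (fun row => PySem.List.slice row (some (ab.1 + 1)) ab.2))
-- Pre_ = exactly the inputs on which Python A returns: every row at least as long as the first row
-- (else Data[y][x] raises IndexError), and every number cell of every block parses as an int
-- (else int(...) raises ValueError, e.g. on the empty cell between two adjacent separator columns).
def Pre_part1 (Data : String) : Prop :=
  (∀ row ∈ pvRows Data, ((pvRows Data).headD []).length ≤ row.length) ∧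
  (∀ b ∈ pvBlocks (pvRows Data), ∀ cell ∈ b.dropLast, (PySem.Int.ofChars? cell).isSome = true)
instance (Data : String) : Decidable (Pre_part1 Data) := by unfold Pre_part1; infer_instance
def pvWitness_part1 : String := "1 2\n3 4\n+ *"
def Spec_part1 (Data : String) (out : Int) : Prop := out = part1_alt Data
instance (Data : String) (out : Int) : Decidable (Spec_part1 Data out) := by unfold Spec_part1; infer_instance

-- ===== CLAIM (what is proved, stated in full; the proofs are below) =====
def Claim_equal_part1 : Prop := ∀ (Data : String), Dom_part1 Data → Pre_part1 Data → Spec_part1 Data (part1 Data)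

-- ===== LEMMAS AND PROOFS =====

-- splitOn never returns the empty list (Python ''.split('\n') == [''])
lemma splitOn_go_ne_nil (sep : List Char) :
    ∀ (fuel : Nat) (l cur : List Char) (acc : List (List Char)),
    PySem.Chars.splitOn.go sep fuel l cur acc ≠ [] := by
  intro fuel
  induction fuel with
  | zero => intro l cur acc; rw [PySem.Chars.splitOn.go.eq_def]; simp
  | succ n ih =>
    intro l cur acc
    rw [PySem.Chars.splitOn.go.eq_def]
    cases l with
    | nil => simp
    | cons c rest =>
      by_cases h : sep.isPrefixOf (c :: rest) = true
      · simpa [h] using ih _ _ _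
      · simpa [h] using ih _ _ _

lemma rows_ne_nil (Data : String) : PySem.Chars.splitOn Data.toList ['\n'] ≠ [] := by
  unfold PySem.Chars.splitOn
  exact splitOn_go_ne_nil _ _ _ _ _

-- a map over indices of rows is a map over rows
lemma map_rows {β : Type} (rows : List (List Char)) (f : List Char → β) :
    (PySem.List.pyRange 0 (PySem.List.len rows)).map
      (fun y => f (PySem.List.pyGetD rows y [])) = rows.map f := by
  have h1 : (fun (y : Int) => f (PySem.List.pyGetD rows y []))
      = f ∘ (fun y => PySem.List.pyGetD rows y []) := rfl
  rw [h1, ← List.map_map, PySem.List.map_pyGetD_pyRange_zero]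

-- A's set test on a column equals the all test of B's blank-column predicate (rows nonempty)
lemma cond_eq (rows : List (List Char)) (hne : rows ≠ []) (x : Int) :
    PySem.Set.equal
      (PySem.Set.ofList ((PySem.List.pyRange 0 (PySem.List.len rows)).map
        (fun y => PySem.List.pyGetD (PySem.List.pyGetD rows y []) x '\x00')))
      (PySem.Set.ofList [' '])
    = rows.all (fun row => PySem.List.pyGetD row x '\x00' == ' ') := by
  rw [map_rows rows (fun row => PySem.List.pyGetD row x '\x00')]
  rw [Bool.eq_iff_iff, PySem.Set.equal_iff, List.all_eq_true]
  constructor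
  · intro h row hrow
    have := (h (PySem.List.pyGetD row x '\x00')).mp
      ((PySem.Set.mem_ofList _ _).mpr (List.mem_map_of_mem hrow))
    rw [PySem.Set.mem_ofList] at this
    simp at this
    simp [this]
  · intro h c
    rw [PySem.Set.mem_ofList, PySem.Set.mem_ofList]
    constructor
    · intro hc
      rcases List.mem_map.mp hc with ⟨row, hrow, hrc⟩
      have := h row hrow
      simp at this
      simp [← hrc, this]
    · intro hc
      simp at hc
      subst hc
      rcases List.exists_mem_of_ne_nil rows hne with ⟨row, hrow⟩
      have := h row hrow
      simp at this
      exact List.mem_map.mpr ⟨row, hrow, by simp [this]⟩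

-- zip against a list one shorter plus a sentinel
lemma zip_snoc {α β : Type} :
    ∀ (l2 : List β) (l1 : List α) (c : β) (d : α), l1.length = l2.length + 1 →
    l1.zip (l2 ++ [c]) = l1.zip l2 ++ [(l1.getLastD d, c)] := by
  intro l2
  induction l2 with
  | nil =>
    intro l1 c d h
    match l1, h with
    | [a], _ => simp
  | cons b t ih =>
    intro l1 c d h
    match l1, h with
    | a :: ta, h =>
      have hlen : ta.length = t.length + 1 := by simpa using h
      have : ta.getLastD d = ta.getLastD a := by
        match ta, hlen with
        | x :: tx, _ =>
          simp [List.getLast?_cons]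
      simp only [List.cons_append, List.zip_cons_cons, ih ta c d hlen, List.getLastD_cons, this]

-- zip truncates: extra elements of the longer first list are ignored
lemma zip_append_left {α β : Type} :
    ∀ (l2 : List β) (l1 extra : List α), l2.length ≤ l1.length →
    (l1 ++ extra).zip l2 = l1.zip l2 := by
  intro l2
  induction l2 with
  | nil => intro l1 extra _; simp
  | cons b t ih =>
    intro l1 extra h
    match l1, h with
    | a :: ta, h => simp [ih ta extra (by simpa using h)]

-- proof-side name for the separator-column list cut at column n
def sepsUpTo (rows : List (List Char)) (n : Nat) : List Int :=
  (PySem.List.pyRange 0 (n : Int)).filter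
    (fun x => rows.all (fun row => PySem.List.pyGetD row x '\x00' == ' '))

-- invariant of A's column loop
lemma parser_loop (rows : List (List Char)) (hne : rows ≠ []) (n : Nat) :
    ((PySem.List.pyRange 0 (n : Int)).foldl
      (fun (st : Int × List (List (List Char))) x =>
        if PySem.Set.equal
            (PySem.Set.ofList ((PySem.List.pyRange 0 (PySem.List.len rows)).map
              (fun y => PySem.List.pyGetD (PySem.List.pyGetD rows y []) x '\x00')))
            (PySem.Set.ofList [' ']) then
          (x + 1,
           st.2 ++ [(PySem.List.pyRange 0 (PySem.List.len rows)).map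
             (fun y => PySem.List.slice (PySem.List.pyGetD rows y []) (some st.1) (some x))])
        else st)
      (0, []))
    = ((sepsUpTo rows n).getLastD (-1) + 1,
       (((-1) :: sepsUpTo rows n).zip (sepsUpTo rows n)).map
         (fun ab => rows.map (fun row => PySem.List.slice row (some (ab.1 + 1)) (some ab.2)))) := by
  induction n with
  | zero =>
    simp [sepsUpTo, PySem.List.pyRange_one_eq_nil (by omega : (0:Int) ≤ 0)]
  | succ n ih =>
    have hcast : ((n + 1 : Nat) : Int) = (n : Int) + 1 := by push_cast; ring
    have hn0 : (0 : Int) ≤ (n : Int) := Int.natCast_nonneg n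
    rw [hcast, PySem.List.pyRange_one_succ_right hn0, List.foldl_append, ih]
    have hsep : sepsUpTo rows (n + 1)
        = sepsUpTo rows n ++ (if rows.all (fun row => PySem.List.pyGetD row (n : Int) '\x00' == ' ')
            then [(n : Int)] else []) := by
      unfold sepsUpTo
      rw [hcast, PySem.List.pyRange_one_succ_right hn0, List.filter_append]
      congr 1
      simp only [List.filter_cons, List.filter_nil]
    rw [hsep]
    simp only [List.foldl_cons, List.foldl_nil]
    rw [cond_eq rows hne (n : Int)]
    by_cases h : rows.all (fun row => PySem.List.pyGetD row (n : Int) '\x00' == ' ') = true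
    · rw [h]
      simp only [if_true]
      set s := sepsUpTo rows n with hs
      have hzip : ((-1) :: (s ++ [(n : Int)])).zip (s ++ [(n : Int)])
          = ((-1) :: s).zip s ++ [(s.getLastD (-1), (n : Int))] := by
        have h1 : ((-1 : Int) :: (s ++ [(n : Int)])) = (((-1) :: s) ++ [(n : Int)]) := by simp
        rw [h1, zip_append_left (s ++ [(n : Int)]) ((-1) :: s) [(n : Int)] (by simp),
            zip_snoc s ((-1) :: s) (n : Int) (-1) (by simp), List.getLastD_cons]
      rw [hzip, List.map_append, List.getLastD_concat]
      refine Prod.ext rfl ?_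
      simp only [List.map_cons, List.map_nil]
      congr 1
      congr 1
      exact map_rows rows (fun row => PySem.List.slice row (some (s.getLastD (-1) + 1)) (some (n : Int)))
    · rw [Bool.eq_false_iff.mpr h]
      simp

-- A's parser produces exactly the declarative block list
lemma parser_eq (Data : String) : parser Data = pvBlocks (pvRows Data) := by
  have hne := rows_ne_nil Data
  simp only [parser, pvRows, pvBlocks, pvSeps]
  set rows := PySem.Chars.splitOn Data.toList ['\n'] with hrows
  rw [PySem.List.len_eq (PySem.List.pyGetD rows 0 [])]
  rw [parser_loop rows hne ((PySem.List.pyGetD rows 0 []).length)]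
  have hseps : (PySem.List.pyRange 0 (((PySem.List.pyGetD rows 0 []).length : Nat) : Int)).filter
      (fun x => rows.all (fun row => PySem.List.pyGetD row x '\x00' == ' '))
      = sepsUpTo rows (PySem.List.pyGetD rows 0 []).length := rfl
  rw [hseps]
  set s := sepsUpTo rows (PySem.List.pyGetD rows 0 []).length with hs
  rw [map_rows rows (fun row => PySem.List.slice row (some (s.getLastD (-1) + 1)) none)]
  rw [zip_snoc (s.map some) ((-1) :: s) none (-1) (by simp), List.getLastD_cons,
      List.zip_map_right]
  simp only [List.map_append, List.map_map, List.map_cons, List.map_nil]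
  rfl

-- A's aggregation loop is the sum of pvEvaluate over the blocks
lemma partA_sum (Data : String) :
    part1 Data = ((pvBlocks (pvRows Data)).map pvEvaluate).sum := by
  rw [part1, parser_eq]
  have hstep : (fun (ans : Int) (problem : List (List Char)) =>
      let numbs := (PySem.List.slice problem none (some (-1))).map
        (fun s => (PySem.Int.ofChars? s).getD 0)
      let op := PySem.List.pyGetD problem (-1) []
      if PySem.Chars.isIn ['+'] op then ans + numbs.sum else ans + numbs.prod)
      = (fun (ans : Int) (problem : List (List Char)) => ans + pvEvaluate problem) := by
    funext ans problem
    simp only [pvEvaluate]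
    split <;> rfl
  rw [hstep, PySem.List.foldl_add]
  simp

-- ---- B side ----

-- find? is the head of the filtered list
lemma find?_eq_filter_head? {α : Type} (p : α → Bool) :
    ∀ l : List α, l.find? p = (l.filter p).head? := by
  intro l
  induction l with
  | nil => rfl
  | cons a t ih =>
    rw [List.find?_cons, List.filter_cons]
    by_cases h : p a = true
    · simp [h]
    · simp only [h]
      simpa using ih

-- Nat-level view of the blank-column predicate and the separator list
def predN (rows : List (List Char)) (j : Nat) : Bool :=
  rows.all (fun row => row.getD j '\x00' == ' ')
def sepsNat (rows : List (List Char)) : List Nat :=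
  (List.range (PySem.List.pyGetD rows 0 []).length).filter (predN rows)

lemma pvSeps_eq (rows : List (List Char)) :
    pvSeps rows = (sepsNat rows).map (fun (j : Nat) => (j : Int)) := by
  unfold pvSeps sepsNat
  rw [PySem.List.len_eq, PySem.List.pyRange_one, List.filter_map]
  simp only [zero_add]
  have hp : ((fun x => rows.all fun row => PySem.List.pyGetD row x '\x00' == ' ')
      ∘ fun (k : Nat) => (k : Int)) = predN rows := by
    funext j
    simp [predN, Function.comp]
  rw [hp]
  simp [← List.map_eq_flatMap]

lemma getD_drop (row : List Char) (k j : Nat) (d : Char) :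
    (row.drop k).getD j d = row.getD (k + j) d := by
  simp [List.getD_eq_getElem?_getD, List.getElem?_drop]

lemma predN_shift (rows : List (List Char)) (k j : Nat) :
    predN (rows.map (fun row => PySem.List.slice row (some (k : Int)) none)) j
      = predN rows (k + j) := by
  unfold predN
  rw [List.all_map]
  congr 1
  funext row
  simp only [Function.comp]
  rw [PySem.List.slice_from row (Int.natCast_nonneg k), Int.toNat_natCast, getD_drop]

lemma sepsNat_shift (r : List Char) (t : List (List Char)) (k : Nat) :
    sepsNat ((r :: t).map (fun row => PySem.List.slice row (some (k : Int)) none))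
      = (List.range (r.length - k)).filter (fun i => predN (r :: t) (k + i)) := by
  unfold sepsNat
  have hw : (PySem.List.pyGetD ((r :: t).map
      (fun row => PySem.List.slice row (some (k : Int)) none)) 0 [])
      = PySem.List.slice r (some (k : Int)) none := by
    simp [PySem.List.pyGetD_zero_cons]
  rw [hw, PySem.List.slice_from r (Int.natCast_nonneg k), Int.toNat_natCast, List.length_drop]
  congr 1
  funext i
  exact predN_shift (r :: t) k i

-- splitting the separator list at its first element
lemma sepsNat_cons (rows : List (List Char)) (r : List Char) (t : List (List Char))
    (hrows : rows = r :: t) (x : Nat) (rest : List Nat)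
    (hS : sepsNat rows = x :: rest) :
    x < r.length ∧
    rest = ((List.range (r.length - (x + 1))).filter
      (fun i => predN rows ((x + 1) + i))).map (fun i => (x + 1) + i) := by
  have hw : (PySem.List.pyGetD rows 0 []).length = r.length := by
    subst hrows; simp [PySem.List.pyGetD_zero_cons]
  have hF : (List.range r.length).filter (predN rows) = x :: rest := by
    unfold sepsNat at hS; rw [hw] at hS; exact hS
  have hxmem : x ∈ (List.range r.length).filter (predN rows) := by rw [hF]; simp
  have hxr : x < r.length := List.mem_range.mp (List.mem_of_mem_filter hxmem)
  have hpx : predN rows x = true := List.of_mem_filter hxmem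
  refine ⟨hxr, ?_⟩
  have hsplit : List.range r.length
      = List.range (x + 1) ++ (List.range (r.length - (x + 1))).map (fun i => (x + 1) + i) := by
    have h1 : r.length = (x + 1) + (r.length - (x + 1)) := by omega
    conv_lhs => rw [h1]
    exact List.range_add
  have hl2 : ((List.range (r.length - (x + 1))).map (fun i => (x + 1) + i)).filter (predN rows)
      = ((List.range (r.length - (x + 1))).filter
          (fun i => predN rows ((x + 1) + i))).map (fun i => (x + 1) + i) := by
    rw [List.filter_map]; rfl
  have hcat : ((List.range (x + 1)).filter (predN rows))
      ++ ((List.range (r.length - (x + 1))).filter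
          (fun i => predN rows ((x + 1) + i))).map (fun i => (x + 1) + i) = x :: rest := by
    rw [← hl2, ← List.filter_append, ← hsplit, hF]
  set l1 := (List.range (x + 1)).filter (predN rows) with hl1def
  have hxl1 : x ∈ l1 := List.mem_filter.mpr ⟨List.mem_range.mpr (by omega), hpx⟩
  have hl1le : ∀ y ∈ l1, y ≤ x := by
    intro y hy
    have := List.mem_range.mp (List.mem_of_mem_filter hy)
    omega
  have hl1pw : l1.Pairwise (· < ·) := List.Pairwise.filter _ List.pairwise_lt_range
  have hl1x : l1 = [x] := by
    cases hl1' : l1 with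
    | nil => rw [hl1'] at hxl1; simp at hxl1
    | cons a s =>
      have hhead : a = x := by
        have h1 := congrArg List.head? hcat
        rw [hl1'] at h1
        simpa using h1
      subst hhead
      cases s with
      | nil => rfl
      | cons b s' =>
        rw [hl1'] at hl1pw hl1le
        have hab : a < b := (List.pairwise_cons.mp hl1pw).1 b (by simp)
        have := hl1le b (by simp)
        omega
  rw [hl1x] at hcat
  simpa using hcat.symm

-- the shifted block lists coincide
lemma blocks_shift (rows : List (List Char)) (k : Nat) :
    ∀ (L : List Int), (∀ i ∈ L, 0 ≤ i) → ∀ (a : Int), -1 ≤ a →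
    (List.zip ((a + (k : Int)) :: L.map (fun i => i + (k : Int)))
        ((L.map (fun i => i + (k : Int))).map some ++ [none])).map
      (fun ab => rows.map (fun row => PySem.List.slice row (some (ab.1 + 1)) ab.2))
    = (List.zip (a :: L) (L.map some ++ [none])).map
      (fun ab => (rows.map (fun row => PySem.List.slice row (some (k : Int)) none)).map
        (fun row => PySem.List.slice row (some (ab.1 + 1)) ab.2)) := by
  intro L
  induction L with
  | nil =>
    intro _ a ha
    simp only [List.map_nil, List.nil_append, List.zip_cons_cons, List.zip_nil_left,
      List.map_cons, List.map_nil]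
    refine congrArg (fun z => [z]) ?_
    rw [List.map_map]
    apply List.map_congr_left
    intro row _
    simp only [Function.comp]
    rw [PySem.List.slice_from row (by omega : (0:Int) ≤ a + (k:Int) + 1),
        PySem.List.slice_from row (Int.natCast_nonneg k), Int.toNat_natCast,
        PySem.List.slice_from (row.drop k) (by omega : (0:Int) ≤ a + 1),
        List.drop_drop]
    congr 1
    omega
  | cons b L' ih =>
    intro hL a ha
    have hb : 0 ≤ b := hL b (by simp)
    simp only [List.map_cons, List.cons_append, List.zip_cons_cons, List.map_cons]
    congr 1
    · rw [List.map_map]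
      apply List.map_congr_left
      intro row _
      simp only [Function.comp]
      rw [PySem.List.slice_toNat row (by omega : (0:Int) ≤ a + (k:Int) + 1)
            (by omega : (0:Int) ≤ b + (k : Int)),
          PySem.List.slice_from row (Int.natCast_nonneg k), Int.toNat_natCast,
          PySem.List.slice_toNat (row.drop k) (by omega : (0:Int) ≤ a + 1) hb,
          List.drop_drop]
      congr 1
      · omega
      · congr 1
        omega
    · exact ih (fun i hi => hL i (by simp [hi])) b (by omega)

-- B's recursion computes the sum of pvEvaluate over the blocks
lemma solve_blocks : ∀ (w : Nat) (rows : List (List Char)),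
    (PySem.List.pyGetD rows 0 []).length = w →
    pvSolve rows = ((pvBlocks rows).map pvEvaluate).sum := by
  intro w
  induction w using Nat.strong_induction_on with
  | _ w ih =>
    intro rows hw
    rw [pvSolve.eq_def]
    split
    next x hfind =>
      rw [find?_eq_filter_head?] at hfind
      have hx : (pvSeps rows).head? = some x := hfind
      rw [pvSeps_eq] at hx
      cases hS : sepsNat rows with
      | nil => rw [hS] at hx; simp at hx
      | cons xN restN =>
        rw [hS] at hx
        simp at hx
        cases rows with
        | nil =>
          exfalso
          have h0 : sepsNat ([] : List (List Char)) = [] := by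
            simp [sepsNat, PySem.List.pyGetD_zero]
          simp [h0] at hS
        | cons r t =>
          obtain ⟨hxr, hrest⟩ := sepsNat_cons (r :: t) r t rfl xN restN hS
          have hwr : w = r.length := by
            rw [← hw]; simp [PySem.List.pyGetD_zero_cons]
          have hk1 : x + 1 = ((xN + 1 : Nat) : Int) := by rw [← hx]; push_cast; ring
          rw [hk1]
          set k := xN + 1 with hkdef
          set FL := (List.range (r.length - k)).filter (fun i => predN (r :: t) (k + i)) with hFL
          set rows' := (r :: t).map (fun row => PySem.List.slice row (some (k : Int)) none)
            with hrows'
          have hseps' : pvSeps rows' = FL.map (fun (i : Nat) => (i : Int)) := by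
            rw [hrows', pvSeps_eq, sepsNat_shift r t k, hFL]
          have hw' : (PySem.List.pyGetD rows' 0 []).length = r.length - k := by
            rw [hrows']
            simp only [List.map_cons, PySem.List.pyGetD_zero_cons]
            rw [PySem.List.slice_from r (Int.natCast_nonneg k), Int.toNat_natCast,
              List.length_drop]
          have hIH := ih (r.length - k) (by omega) rows' hw'
          set FLc := FL.map (fun (i : Nat) => (i : Int)) with hFLc
          have hFLc0 : ∀ i ∈ FLc, 0 ≤ i := by
            intro i hi
            rw [hFLc] at hi
            obtain ⟨j, _, hj⟩ := List.mem_map.mp hi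
            omega
          have hmapcast : restN.map (fun (j : Nat) => (j : Int))
              = FLc.map (fun i => i + (k : Int)) := by
            rw [hrest, hFLc]
            simp only [List.map_map]
            apply List.map_congr_left
            intro i _
            simp only [Function.comp]
            push_cast
            ring
          have hshift := blocks_shift (r :: t) k FLc hFLc0 (-1) (by omega)
          have hxk : (xN : Int) = (-1) + (k : Int) := by push_cast; omega
          have hblocks : pvBlocks (r :: t)
              = ((r :: t).map (fun row => PySem.List.slice row (some ((-1 : Int) + 1))
                  (some ((-1) + (k : Int)))))
                :: pvBlocks rows' := by
            unfold pvBlocks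
            rw [hseps', pvSeps_eq (r :: t), hS]
            simp only [List.map_cons, hmapcast, List.cons_append, List.zip_cons_cons,
              List.map_cons]
            rw [hxk]
            refine congrArg₂ List.cons rfl ?_
            exact hshift
          have hhead : (r :: t).map (fun row => PySem.List.slice row (some ((-1 : Int) + 1))
                (some ((-1) + (k : Int))))
              = (r :: t).map (fun row => PySem.List.slice row none (some (xN : Int))) := by
            apply List.map_congr_left
            intro row _
            rw [show ((-1 : Int) + 1) = 0 from by ring, PySem.List.slice_zero_start,
              show ((-1) + (k : Int)) = (xN : Int) from by push_cast; omega]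
          rw [← hx, hblocks, hhead]
          simp only [List.map_cons, List.sum_cons]
          rw [← hIH]
    next hfind =>
      rw [find?_eq_filter_head?] at hfind
      have hsep : pvSeps rows = [] := List.head?_eq_none_iff.mp hfind
      simp [pvBlocks, hsep, PySem.List.slice_zero_start, PySem.List.slice_none_none]

lemma main_eq (Data : String) : part1 Data = part1_alt Data := by
  rw [partA_sum, part1_alt]
  exact (solve_blocks _ _ rfl).symm

-- ===== VERDICT (by name: the statement is the Claim_ definition above) =====
theorem part1_spec : Claim_equal_part1 := by
  unfold Claim_equal_part1
  intro Data _ _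
  exact main_eq Data
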